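-- pv_equiv track=rewrite | github.com/BUZZARDGTA/amd_adrenalin_control | src/amd_adrenalin_control/_report_helpers.py | build_stop_all_report_sections
-- ===== SOURCE A (Python) =====
-- def to_report_entry(
--     process_info: dict[int, dict[str, str]],
--     pid: int,
-- ) -> dict[str, str]:
--     """Build a single report row for a PID from captured process metadata."""
--     info = process_info.get(
--         pid,
--         {
--             'name': '<unknown>',
--             'category': 'Unknown',
--             'parent': '<unknown>',
--             'path': '<unavailable>',
--         },
--     )
--     return {
--         'name': info['name'],
--         'pid': str(pid),
--         'category': info['category'],
--         'parent': info['parent'],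
--         'path': info['path'],
--     }
--
-- def build_stop_all_report_sections(
--     process_info: dict[int, dict[str, str]],
--     stopped_pids_total: set[int],
--     denied_pids_total: set[int],
-- ) -> list[tuple[str, list[dict[str, str]]]]:
--     """Build grouped report sections for stop-all results."""
--     attempted_pids = set(process_info)
--     category_order: dict[str, int] = {
--         'Managed': 0,
--         'Companion': 1,
--         'Service': 2,
--         'Unknown': 3,
--     }
--
--     def report_sort_key(pid: int) -> tuple[int, int]:
--         info = process_info.get(pid)
--         category = info['category'] if info is not None else 'Unknown'
--         return category_order.get(category, 99), pid
--
--     stopped_known = sorted(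
--         (pid for pid in attempted_pids if pid in stopped_pids_total),
--         key=report_sort_key,
--     )
--     denied_known = sorted(
--         (pid for pid in attempted_pids if pid in denied_pids_total),
--         key=report_sort_key,
--     )
--     gone_known = sorted(
--         (pid for pid in attempted_pids
--             if pid not in stopped_pids_total
--             and pid not in denied_pids_total),
--         key=report_sort_key,
--     )
--
--     return [
--         ('Closed', [
--             to_report_entry(process_info, pid)
--             for pid in stopped_known
--         ]),
--         (
--             'Could not close (permissions)',
--             [to_report_entry(process_info, pid) for pid in denied_known],
--         ),
--         (
--             'Already gone / ended during action',
--             [to_report_entry(process_info, pid) for pid in gone_known],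
--         ),
--     ]
-- ===== SOURCE B (Python) =====
-- _CATEGORY_RANK = {'Managed': 0, 'Companion': 1, 'Service': 2, 'Unknown': 3}
--
--
-- def build_stop_all_report_sections(process_info, stopped_pids_total, denied_pids_total):
--     """One sort over all attempted PIDs, then a single partition pass into the
--     three buckets (independent membership tests), then map rows per bucket."""
--     def sort_key(pid):
--         info = process_info.get(pid)
--         category = info['category'] if info is not None else 'Unknown'
--         return (_CATEGORY_RANK.get(category, 99), pid)
--
--     ordered = sorted(process_info, key=sort_key)
--
--     stopped, denied, gone = [], [], []
--     for pid in ordered: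
--         hit = False
--         if pid in stopped_pids_total:
--             stopped.append(pid)
--             hit = True
--         if pid in denied_pids_total:
--             denied.append(pid)
--             hit = True
--         if not hit:
--             gone.append(pid)
--
--     def row(pid):
--         info = process_info[pid]
--         return {
--             'name': info['name'],
--             'pid': str(pid),
--             'category': info['category'],
--             'parent': info['parent'],
--             'path': info['path'],
--         }
--
--     return [
--         ('Closed', [row(pid) for pid in stopped]),
--         ('Could not close (permissions)', [row(pid) for pid in denied]),
--         ('Already gone / ended during action', [row(pid) for pid in gone]),
--     ]
-- ===== Notes on version B (the rewrite author's own statement) =====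
-- stated objective: alternative
-- what changed: Replaces A's three filter-then-sort passes (one sort per bucket) with a single sort of all attempted PIDs followed by one partition pass that distributes each PID into the three buckets with independent membership tests.
import Mathlib
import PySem

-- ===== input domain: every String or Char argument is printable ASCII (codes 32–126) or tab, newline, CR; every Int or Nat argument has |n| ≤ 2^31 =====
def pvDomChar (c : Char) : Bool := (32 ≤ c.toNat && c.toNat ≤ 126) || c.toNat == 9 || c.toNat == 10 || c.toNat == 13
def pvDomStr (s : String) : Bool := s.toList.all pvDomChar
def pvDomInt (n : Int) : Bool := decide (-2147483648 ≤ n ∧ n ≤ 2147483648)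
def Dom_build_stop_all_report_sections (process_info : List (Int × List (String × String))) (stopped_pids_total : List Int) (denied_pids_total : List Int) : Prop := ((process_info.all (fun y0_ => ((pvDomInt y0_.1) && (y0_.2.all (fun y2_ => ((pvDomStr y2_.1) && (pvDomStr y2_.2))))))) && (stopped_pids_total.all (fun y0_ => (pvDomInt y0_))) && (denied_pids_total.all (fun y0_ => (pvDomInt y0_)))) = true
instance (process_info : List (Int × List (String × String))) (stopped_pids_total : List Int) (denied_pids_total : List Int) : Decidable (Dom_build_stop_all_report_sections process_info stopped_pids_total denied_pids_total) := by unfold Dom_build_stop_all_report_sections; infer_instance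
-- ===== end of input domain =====

-- B sorts the attempted PIDs once and distributes them into the three buckets in a single partition
-- pass with independent membership tests, instead of A's three filter-then-sort passes (alternative
-- decomposition, same asymptotic cost).

-- ===== PORT A =====
-- the dict[int, dict[str, str]] parameter as a PySem.Dict (duplicate keys: last value wins, first
-- position kept — Python-exact); used by both ports
def pvInfoDict (process_info : List (Int × List (String × String))) : PySem.Dict Int (PySem.Dict String String) :=
  PySem.Dict.ofList (process_info.map (fun p => (p.1, PySem.Dict.ofList p.2)))

def pvDefaultInfo : PySem.Dict String String :=
  PySem.Dict.ofList [("name", "<unknown>"), ("category", "Unknown"), ("parent", "<unknown>"), ("path", "<unavailable>")]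

def pvCategoryOrder : PySem.Dict String Int :=
  PySem.Dict.ofList [("Managed", 0), ("Companion", 1), ("Service", 2), ("Unknown", 3)]

-- first component of report_sort_key; A's and B's Python define this key function identically, so
-- both ports use it.  info['category'] is ported as Dict.getD info "category" "": exact under
-- Pre_ (outside Pre_ the Python raises KeyError there).
def pvRank (d : PySem.Dict Int (PySem.Dict String String)) (pid : Int) : Int :=
  let category := match d.get? pid with
    | some info => info.getD "category" ""
    | none => "Unknown"
  pvCategoryOrder.getD category 99

-- to_report_entry; the four field reads are Dict.getD … "": exact under Pre_ (KeyError outside)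
def to_report_entry_port (d : PySem.Dict Int (PySem.Dict String String)) (pid : Int) : List (String × String) :=
  let info := (d.get? pid).getD pvDefaultInfo
  [("name", info.getD "name" ""), ("pid", PySem.Int.toStr pid),
   ("category", info.getD "category" ""), ("parent", info.getD "parent" ""), ("path", info.getD "path" "")]

-- A: attempted = set(process_info) (= the dict's keys, Nodup); each bucket is filtered from it and
-- sorted with key (rank, pid) — injective in pid, so the set's iteration order cannot matter
def build_stop_all_report_sections (process_info : List (Int × List (String × String))) (stopped_pids_total : List Int) (denied_pids_total : List Int) : List (String × (List (List (String × String)))) :=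
  let d := pvInfoDict process_info
  let attempted := d.keys
  let stopped_known := PySem.List.sorted2 (attempted.filter (fun pid => stopped_pids_total.contains pid)) (pvRank d) (fun pid => pid)
  let denied_known := PySem.List.sorted2 (attempted.filter (fun pid => denied_pids_total.contains pid)) (pvRank d) (fun pid => pid)
  let gone_known := PySem.List.sorted2 (attempted.filter (fun pid => !stopped_pids_total.contains pid && !denied_pids_total.contains pid)) (pvRank d) (fun pid => pid)
  [("Closed", stopped_known.map (to_report_entry_port d)),
   ("Could not close (permissions)", denied_known.map (to_report_entry_port d)),
   ("Already gone / ended during action", gone_known.map (to_report_entry_port d))]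

-- ===== PORT B =====
-- B's row builder: info = process_info[pid]; pid always comes from the dict's own keys, so the
-- Dict.getD … Dict.empty total form is exact
def pvRow (d : PySem.Dict Int (PySem.Dict String String)) (pid : Int) : List (String × String) :=
  let info := d.getD pid PySem.Dict.empty
  [("name", info.getD "name" ""), ("pid", PySem.Int.toStr pid),
   ("category", info.getD "category" ""), ("parent", info.getD "parent" ""), ("path", info.getD "path" "")]

def build_stop_all_report_sections_alt (process_info : List (Int × List (String × String))) (stopped_pids_total : List Int) (denied_pids_total : List Int) : List (String × (List (List (String × String)))) :=
  let d := pvInfoDict process_info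
  let ordered := PySem.List.sorted2 d.keys (pvRank d) (fun pid => pid)
  let part := ordered.foldl (fun (acc : List Int × List Int × List Int) pid =>
      let hit := stopped_pids_total.contains pid || denied_pids_total.contains pid
      (if stopped_pids_total.contains pid then acc.1 ++ [pid] else acc.1,
       if denied_pids_total.contains pid then acc.2.1 ++ [pid] else acc.2.1,
       if !hit then acc.2.2 ++ [pid] else acc.2.2)) ([], [], [])
  [("Closed", part.1.map (pvRow d)),
   ("Could not close (permissions)", part.2.1.map (pvRow d)),
   ("Already gone / ended during action", part.2.2.map (pvRow d))]

-- ===== PRECONDITION & SPEC =====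
-- Pre_: every info dict of the (deduplicated) process_info dict carries the keys 'name',
-- 'category', 'parent' and 'path' — exactly where the Python A returns normally (otherwise it
-- raises KeyError in report_sort_key or to_report_entry).
def Pre_build_stop_all_report_sections (process_info : List (Int × List (String × String))) (stopped_pids_total : List Int) (denied_pids_total : List Int) : Prop :=
  ∀ pr ∈ (pvInfoDict process_info).items,
    (pr.2.contains "name" && pr.2.contains "category" && pr.2.contains "parent" && pr.2.contains "path") = true
instance (process_info : List (Int × List (String × String))) (stopped_pids_total : List Int) (denied_pids_total : List Int) : Decidable (Pre_build_stop_all_report_sections process_info stopped_pids_total denied_pids_total) := by unfold Pre_build_stop_all_report_sections; infer_instance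

def pvWitness_build_stop_all_report_sections : (List (Int × List (String × String))) × List Int × List Int :=
  ([(1, [("name", "app"), ("category", "Managed"), ("parent", "init"), ("path", "/a")]),
    (2, [("name", "svc"), ("category", "Service"), ("parent", "init"), ("path", "/b")])],
   [1], [2])

def Spec_build_stop_all_report_sections (process_info : List (Int × List (String × String))) (stopped_pids_total : List Int) (denied_pids_total : List Int) (out : List (String × (List (List (String × String))))) : Prop := out = build_stop_all_report_sections_alt process_info stopped_pids_total denied_pids_total
instance (process_info : List (Int × List (String × String))) (stopped_pids_total : List Int) (denied_pids_total : List Int) (out : List (String × (List (List (String × String))))) : Decidable (Spec_build_stop_all_report_sections process_info stopped_pids_total denied_pids_total out) := by unfold Spec_build_stop_all_report_sections; infer_instance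

-- ===== CLAIM (what is proved, stated in full; the proofs are below) =====
def Claim_equal_build_stop_all_report_sections : Prop := ∀ (process_info : List (Int × List (String × String))) (stopped_pids_total : List Int) (denied_pids_total : List Int), Dom_build_stop_all_report_sections process_info stopped_pids_total denied_pids_total → Pre_build_stop_all_report_sections process_info stopped_pids_total denied_pids_total → Spec_build_stop_all_report_sections process_info stopped_pids_total denied_pids_total (build_stop_all_report_sections process_info stopped_pids_total denied_pids_total)

-- ===== LEMMAS AND PROOFS =====

-- the boolean comparator sorted2 uses for the key (k1 pid, pid)
def pLt (k1 : Int → Int) (a b : Int) : Bool :=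
  decide (k1 a < k1 b) || (!decide (k1 b < k1 a) && decide (a < b))

theorem pLt_eq_true_iff {k1 : Int → Int} {a b : Int} :
    pLt k1 a b = true ↔ (k1 a < k1 b ∨ (k1 a ≤ k1 b ∧ a < b)) := by
  simp only [pLt, Bool.or_eq_true, Bool.and_eq_true, Bool.not_eq_true', decide_eq_true_eq,
    decide_eq_false_iff_not]
  omega

theorem pLt_eq_false_iff {k1 : Int → Int} {a b : Int} :
    pLt k1 a b = false ↔ ¬ (k1 a < k1 b ∨ (k1 a ≤ k1 b ∧ a < b)) := by
  rw [Bool.eq_false_iff, Ne, pLt_eq_true_iff]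

theorem pLt_asymm {k1 : Int → Int} {a b : Int} (h : pLt k1 a b = true) : pLt k1 b a = false := by
  rw [pLt_eq_true_iff] at h
  rw [pLt_eq_false_iff]
  omega

theorem pLt_trans {k1 : Int → Int} {a b c : Int} (h1 : pLt k1 a b = true)
    (h2 : pLt k1 b c = true) : pLt k1 a c = true := by
  rw [pLt_eq_true_iff] at h1 h2 ⊢
  omega

theorem pLt_step {k1 : Int → Int} {x y z : Int} (h1 : pLt k1 x y = true)
    (h2 : pLt k1 z y = false) : pLt k1 x z = true := by
  rw [pLt_eq_true_iff] at h1 ⊢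
  rw [pLt_eq_false_iff] at h2
  omega

theorem insertBy_pairwise_pLt {k1 : Int → Int} (x : Int) (l : List Int)
    (h : l.Pairwise (fun a b => pLt k1 b a = false)) :
    (PySem.List.insertBy (pLt k1) x l).Pairwise (fun a b => pLt k1 b a = false) := by
  induction l with
  | nil => simp [PySem.List.insertBy]
  | cons y ys ih =>
    rw [List.pairwise_cons] at h
    by_cases hxy : pLt k1 x y = true
    · simp only [PySem.List.insertBy, hxy, if_true]
      rw [List.pairwise_cons]
      refine ⟨?_, List.pairwise_cons.2 h⟩
      intro z hz
      rcases List.mem_cons.1 hz with rfl | hz'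
      · exact pLt_asymm hxy
      · cases hb : pLt k1 z x with
        | false => rfl
        | true => exact absurd (h.1 z hz') (by simp [pLt_trans hb hxy])
    · have hxy' : pLt k1 x y = false := Bool.eq_false_iff.2 hxy
      simp only [PySem.List.insertBy, hxy', Bool.false_eq_true, if_false]
      rw [List.pairwise_cons]
      refine ⟨?_, ih h.2⟩
      intro z hz
      rcases (PySem.List.mem_insertBy _ _ _ _).1 hz with rfl | hz'
      · exact hxy'
      · exact h.1 z hz'

theorem insertBy_all_lt {k1 : Int → Int} {x : Int} {l : List Int}
    (h : ∀ z ∈ l, pLt k1 x z = true) : PySem.List.insertBy (pLt k1) x l = x :: l := by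
  cases l with
  | nil => rfl
  | cons y ys => simp [PySem.List.insertBy, h y (List.mem_cons_self ..)]

theorem filter_insertBy {k1 : Int → Int} (p : Int → Bool) (x : Int) (l : List Int)
    (h : l.Pairwise (fun a b => pLt k1 b a = false)) :
    (PySem.List.insertBy (pLt k1) x l).filter p
      = if p x then PySem.List.insertBy (pLt k1) x (l.filter p) else l.filter p := by
  induction l with
  | nil => by_cases hpx : p x = true <;> simp [PySem.List.insertBy, hpx]
  | cons y ys ih =>
    rw [List.pairwise_cons] at h
    by_cases hxy : pLt k1 x y = true
    · simp only [PySem.List.insertBy, hxy, if_true]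
      by_cases hpx : p x = true
      · by_cases hpy : p y = true
        · simp [hpx, hpy, PySem.List.insertBy, hxy]
        · have hall : ∀ z ∈ ys.filter p, pLt k1 x z = true := by
            intro z hz
            exact pLt_step hxy (h.1 z (List.mem_of_mem_filter hz))
          simp [hpx, hpy, insertBy_all_lt hall]
      · simp [List.filter_cons, hpx]
    · have hxy' : pLt k1 x y = false := Bool.eq_false_iff.2 hxy
      simp only [PySem.List.insertBy, hxy', Bool.false_eq_true, if_false]
      by_cases hpy : p y = true
      · simp only [List.filter_cons, hpy, if_true, ih h.2]
        by_cases hpx : p x = true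
        · simp [hpx, PySem.List.insertBy, hxy']
        · simp [hpx]
      · simp [hpy, ih h.2]

theorem filter_foldl_insertBy {k1 : Int → Int} (p : Int → Bool) :
    ∀ (xs : List Int) (acc : List Int), acc.Pairwise (fun a b => pLt k1 b a = false) →
      (xs.foldl (fun acc x => PySem.List.insertBy (pLt k1) x acc) acc).filter p
        = (xs.filter p).foldl (fun acc x => PySem.List.insertBy (pLt k1) x acc) (acc.filter p) := by
  intro xs
  induction xs with
  | nil => intro acc _; rfl
  | cons x xs ih =>
    intro acc hacc
    have hins : (PySem.List.insertBy (pLt k1) x acc).Pairwise (fun a b => pLt k1 b a = false) :=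
      insertBy_pairwise_pLt x acc hacc
    simp only [List.foldl_cons, List.filter_cons]
    rw [ih _ hins, filter_insertBy p x acc hacc]
    by_cases hpx : p x = true
    · simp [hpx]
    · simp [hpx]

theorem sorted2_filter {k1 : Int → Int} (p : Int → Bool) (xs : List Int) :
    (PySem.List.sorted2 xs k1 (fun x => x) false).filter p
      = PySem.List.sorted2 (xs.filter p) k1 (fun x => x) false := by
  have h1 : PySem.List.sorted2 xs k1 (fun x => x) false
      = xs.foldl (fun acc x => PySem.List.insertBy (pLt k1) x acc) [] := rfl
  have h2 : PySem.List.sorted2 (xs.filter p) k1 (fun x => x) false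
      = (xs.filter p).foldl (fun acc x => PySem.List.insertBy (pLt k1) x acc) [] := rfl
  rw [h1, h2, filter_foldl_insertBy p xs [] (by simp)]
  rfl

theorem partition_foldl (s t : List Int) :
    ∀ (xs : List Int) (s0 d0 g0 : List Int),
      xs.foldl (fun (acc : List Int × List Int × List Int) pid =>
          (if s.contains pid then acc.1 ++ [pid] else acc.1,
           if t.contains pid then acc.2.1 ++ [pid] else acc.2.1,
           if !(s.contains pid || t.contains pid) then acc.2.2 ++ [pid] else acc.2.2)) (s0, d0, g0)
        = (s0 ++ xs.filter (fun pid => s.contains pid),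
           d0 ++ xs.filter (fun pid => t.contains pid),
           g0 ++ xs.filter (fun pid => !s.contains pid && !t.contains pid)) := by
  intro xs
  induction xs with
  | nil => intro s0 d0 g0; simp
  | cons x xs ih =>
    intro s0 d0 g0
    rw [List.foldl_cons, ih]
    cases hs : s.contains x <;> cases ht : t.contains x <;>
      simp [hs, ht, List.filter_cons] <;> simp_all [List.contains_eq_mem]

theorem row_eq (d : PySem.Dict Int (PySem.Dict String String)) (pid : Int)
    (h : d.contains pid = true) : to_report_entry_port d pid = pvRow d pid := by
  rw [PySem.Dict.contains_eq_isSome_get?] at h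
  obtain ⟨info, hi⟩ := Option.isSome_iff_exists.1 h
  simp [to_report_entry_port, pvRow, PySem.Dict.getD, hi]

theorem bucket_map_eq (d : PySem.Dict Int (PySem.Dict String String)) (p : Int → Bool) :
    (PySem.List.sorted2 (d.keys.filter p) (pvRank d) (fun pid => pid) false).map (to_report_entry_port d)
      = (PySem.List.sorted2 (d.keys.filter p) (pvRank d) (fun pid => pid) false).map (pvRow d) := by
  apply List.map_congr_left
  intro pid hpid
  apply row_eq
  rw [PySem.Dict.contains_iff_mem_keys]
  exact List.mem_of_mem_filter ((PySem.List.sorted2_perm _ _ _ _).mem_iff.1 hpid)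

-- ===== VERDICT (by name: the statement is the Claim_ definition above) =====
theorem build_stop_all_report_sections_spec : Claim_equal_build_stop_all_report_sections := by
  unfold Claim_equal_build_stop_all_report_sections
  intro process_info stopped_pids_total denied_pids_total _ _
  unfold Spec_build_stop_all_report_sections
  simp only [build_stop_all_report_sections, build_stop_all_report_sections_alt]
  rw [partition_foldl]
  simp only [List.nil_append]
  rw [sorted2_filter, sorted2_filter, sorted2_filter]
  rw [bucket_map_eq, bucket_map_eq, bucket_map_eq]
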